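-- pv_equiv track=rewrite | github.com/open3doled/VLCModule | scripts/patch_vlc3_t64_host_plugins.py | normalize_guarded_alias_block
-- ===== SOURCE A (Python) =====
-- ALIAS_BLOCK = """/*
--  * Host distro VLC 3.0.x builds may look for the Debian/Ubuntu t64 module
--  * entry symbol even when building against the upstream 3.0.23 source tree.
--  * Export both entry names so the staged plugin can be loaded by the host
--  * launcher without affecting the AppImage runtime.
--  */
-- #ifdef __cplusplus
-- extern "C" {
-- #endif
-- extern int CDECL_SYMBOL vlc_entry__3_0_0f(vlc_set_cb, void *);
-- extern const char *CDECL_SYMBOL vlc_entry_copyright__3_0_0f(void);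
-- extern const char *CDECL_SYMBOL vlc_entry_license__3_0_0f(void);
-- EXTERN_SYMBOL DLL_SYMBOL int CDECL_SYMBOL vlc_entry__3_0_0ft64(vlc_set_cb, void *);
-- EXTERN_SYMBOL DLL_SYMBOL const char *CDECL_SYMBOL vlc_entry_copyright__3_0_0ft64(void);
-- EXTERN_SYMBOL DLL_SYMBOL const char *CDECL_SYMBOL vlc_entry_license__3_0_0ft64(void);
--
-- EXTERN_SYMBOL DLL_SYMBOL int CDECL_SYMBOL
-- vlc_entry__3_0_0ft64(vlc_set_cb vlc_set, void *opaque)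
-- {
--     return vlc_entry__3_0_0f(vlc_set, opaque);
-- }
--
-- EXTERN_SYMBOL DLL_SYMBOL const char *CDECL_SYMBOL
-- vlc_entry_copyright__3_0_0ft64(void)
-- {
--     return vlc_entry_copyright__3_0_0f();
-- }
--
-- EXTERN_SYMBOL DLL_SYMBOL const char *CDECL_SYMBOL
-- vlc_entry_license__3_0_0ft64(void)
-- {
--     return vlc_entry_license__3_0_0f();
-- }
-- #ifdef __cplusplus
-- }
-- #endif
--
-- """
--
-- def normalize_guarded_alias_block(text: str) -> str:
--     guard = "#if defined(OPEN3D_VLC_ABI_ALIAS_T64)\n"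
--     start = text.find(guard)
--     while start >= 0:
--         end = text.find("#endif", start)
--         if end < 0:
--             break
--         end = text.find("\n", end)
--         if end < 0:
--             end = len(text)
--         else:
--             end += 1
--         block = text[start:end]
--         if "vlc_entry__3_0_0ft64" in block and "vlc_entry__3_0_0f" in block:
--             text = text[:start] + ALIAS_BLOCK + text[end:]
--             start = text.find(guard, start + len(ALIAS_BLOCK))
--             continue
--         start = text.find(guard, end)
--     return text
-- ===== SOURCE B (Python) =====
-- ALIAS_BLOCK = """/*
--  * Host distro VLC 3.0.x builds may look for the Debian/Ubuntu t64 module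
--  * entry symbol even when building against the upstream 3.0.23 source tree.
--  * Export both entry names so the staged plugin can be loaded by the host
--  * launcher without affecting the AppImage runtime.
--  */
-- #ifdef __cplusplus
-- extern "C" {
-- #endif
-- extern int CDECL_SYMBOL vlc_entry__3_0_0f(vlc_set_cb, void *);
-- extern const char *CDECL_SYMBOL vlc_entry_copyright__3_0_0f(void);
-- extern const char *CDECL_SYMBOL vlc_entry_license__3_0_0f(void);
-- EXTERN_SYMBOL DLL_SYMBOL int CDECL_SYMBOL vlc_entry__3_0_0ft64(vlc_set_cb, void *);
-- EXTERN_SYMBOL DLL_SYMBOL const char *CDECL_SYMBOL vlc_entry_copyright__3_0_0ft64(void);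
-- EXTERN_SYMBOL DLL_SYMBOL const char *CDECL_SYMBOL vlc_entry_license__3_0_0ft64(void);
--
-- EXTERN_SYMBOL DLL_SYMBOL int CDECL_SYMBOL
-- vlc_entry__3_0_0ft64(vlc_set_cb vlc_set, void *opaque)
-- {
--     return vlc_entry__3_0_0f(vlc_set, opaque);
-- }
--
-- EXTERN_SYMBOL DLL_SYMBOL const char *CDECL_SYMBOL
-- vlc_entry_copyright__3_0_0ft64(void)
-- {
--     return vlc_entry_copyright__3_0_0f();
-- }
--
-- EXTERN_SYMBOL DLL_SYMBOL const char *CDECL_SYMBOL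
-- vlc_entry_license__3_0_0ft64(void)
-- {
--     return vlc_entry_license__3_0_0f();
-- }
-- #ifdef __cplusplus
-- }
-- #endif
--
-- """
--
--
-- def normalize_guarded_alias_block(text: str) -> str:
--     # Single forward pass: consume the text front-to-back, collecting the
--     # untouched pieces and the (possibly replaced) guarded blocks, and join
--     # once at the end -- the text is never re-spliced and re-searched.
--     guard = "#if defined(OPEN3D_VLC_ABI_ALIAS_T64)\n"
--     out = []
--     rest = text
--     while True:
--         i = rest.find(guard)
--         if i < 0:
--             break
--         e = rest.find("#endif", i + len(guard))
--         if e < 0: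
--             break
--         nl = rest.find("\n", e + len("#endif"))
--         cut = len(rest) if nl < 0 else nl + 1
--         block = rest[i:cut]
--         out.append(rest[:i])
--         out.append(ALIAS_BLOCK if "vlc_entry__3_0_0ft64" in block else block)
--         rest = rest[cut:]
--     out.append(rest)
--     return "".join(out)
-- ===== Notes on version B (the rewrite author's own statement) =====
-- stated objective: simpler
-- what changed: A repeatedly splices the replacement into the text and re-searches the rebuilt string with absolute-index bookkeeping; B makes one forward pass that collects the untouched pieces and the (possibly replaced) guarded blocks into a list and joins once, searching the block terminator after the guard and dropping the redundant second containment test.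
import Mathlib
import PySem

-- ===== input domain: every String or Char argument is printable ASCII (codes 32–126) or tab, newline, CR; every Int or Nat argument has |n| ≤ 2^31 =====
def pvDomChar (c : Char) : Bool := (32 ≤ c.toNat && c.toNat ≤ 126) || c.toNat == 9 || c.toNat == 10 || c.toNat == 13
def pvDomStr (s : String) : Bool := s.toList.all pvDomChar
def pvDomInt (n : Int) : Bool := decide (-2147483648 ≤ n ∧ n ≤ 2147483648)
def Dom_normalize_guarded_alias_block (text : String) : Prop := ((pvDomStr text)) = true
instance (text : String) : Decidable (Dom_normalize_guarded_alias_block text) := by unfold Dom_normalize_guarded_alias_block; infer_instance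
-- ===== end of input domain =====

-- B replaces A's splice-and-rescan while loop by a single forward pass that collects
-- the pieces and joins them once (objective: simpler one-pass structure, same result).

-- shared string constants of the two Pythons
def pvGuard : List Char := "#if defined(OPEN3D_VLC_ABI_ALIAS_T64)\n".toList
def pvEndif : List Char := "#endif".toList
def pvNl : List Char := "\n".toList
def pvFt64 : List Char := "vlc_entry__3_0_0ft64".toList
def pvF : List Char := "vlc_entry__3_0_0f".toList
def pvAliasBlock : List Char := "/*\n * Host distro VLC 3.0.x builds may look for the Debian/Ubuntu t64 module\n * entry symbol even when building against the upstream 3.0.23 source tree.\n * Export both entry names so the staged plugin can be loaded by the host\n * launcher without affecting the AppImage runtime.\n */\n#ifdef __cplusplus\nextern \"C\" {\n#endif\nextern int CDECL_SYMBOL vlc_entry__3_0_0f(vlc_set_cb, void *);\nextern const char *CDECL_SYMBOL vlc_entry_copyright__3_0_0f(void);\nextern const char *CDECL_SYMBOL vlc_entry_license__3_0_0f(void);\nEXTERN_SYMBOL DLL_SYMBOL int CDECL_SYMBOL vlc_entry__3_0_0ft64(vlc_set_cb, void *);\nEXTERN_SYMBOL DLL_SYMBOL const char *CDECL_SYMBOL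 vlc_entry_copyright__3_0_0ft64(void);\nEXTERN_SYMBOL DLL_SYMBOL const char *CDECL_SYMBOL vlc_entry_license__3_0_0ft64(void);\n\nEXTERN_SYMBOL DLL_SYMBOL int CDECL_SYMBOL\nvlc_entry__3_0_0ft64(vlc_set_cb vlc_set, void *opaque)\n{\n    return vlc_entry__3_0_0f(vlc_set, opaque);\n}\n\nEXTERN_SYMBOL DLL_SYMBOL const char *CDECL_SYMBOL\nvlc_entry_copyright__3_0_0ft64(void)\n{\n    return vlc_entry_copyright__3_0_0f();\n}\n\nEXTERN_SYMBOL DLL_SYMBOL const char *CDECL_SYMBOL\nvlc_entry_license__3_0_0ft64(void)\n{\n    return vlc_entry_license__3_0_0f();\n}\n#ifdef __cplusplus\n}\n#endif\n\n".toList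

-- facts about PySem.Chars.findFrom needed by the ports' termination proofs
-- (proved with explicit lemma chains: these are in the ports' definition closure)
lemma pv_ne_neg_one {a : Int} (h : ¬ a < 0) : a ≠ -1 :=
  fun he => h (by rw [he]; decide)

lemma pv_findFrom_past (s sub : List Char) (k : Int) (h : (s.length : Int) < k) :
    PySem.Chars.findFrom s sub k none = -1 := by
  have h0 : ¬ k < 0 := Int.not_lt.mpr (le_trans (Int.natCast_nonneg _) (le_of_lt h))
  simp only [PySem.Chars.findFrom, if_neg h0]
  rw [if_pos h]

lemma pv_findFrom_le_length (s sub : List Char) (k : Int)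
    (h : PySem.Chars.findFrom s sub k none ≠ -1) : k ≤ (s.length : Int) :=
  not_lt.mp (fun hc => h (pv_findFrom_past s sub k hc))

lemma pv_findFrom_spec (s sub : List Char) (k : Int) (hk : 0 ≤ k)
    (h : ¬ PySem.Chars.findFrom s sub k none < 0) :
    k ≤ PySem.Chars.findFrom s sub k none ∧
      sub <+: s.drop (PySem.Chars.findFrom s sub k none).toNat ∧
      ∀ i, k.toNat ≤ i → i < (PySem.Chars.findFrom s sub k none).toNat →
        ¬ sub <+: s.drop i := by
  obtain ⟨m, rfl⟩ : ∃ m : Nat, k = (m : Int) := ⟨k.toNat, (Int.toNat_of_nonneg hk).symm⟩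
  have hne : PySem.Chars.findFrom s sub (m : Int) none ≠ -1 := pv_ne_neg_one h
  have hm : m ≤ s.length := Nat.cast_le.mp (pv_findFrom_le_length s sub (m : Int) hne)
  have hs := PySem.Chars.findFrom_natCast_spec s sub m hm hne
  refine ⟨hs.1, hs.2.1, fun i hi => hs.2.2 i ?_⟩
  rwa [Int.toNat_natCast] at hi

lemma pv_findFrom_add_len (s sub : List Char) (k : Int) (hk : 0 ≤ k)
    (h : ¬ PySem.Chars.findFrom s sub k none < 0) (hsub : sub ≠ []) :
    (PySem.Chars.findFrom s sub k none).toNat + sub.length ≤ s.length := by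
  have hs := (pv_findFrom_spec s sub k hk h).2.1
  have h1 : sub.length ≤ (s.drop (PySem.Chars.findFrom s sub k none).toNat).length :=
    hs.length_le
  rw [List.length_drop] at h1
  have h2 : 0 < sub.length := List.length_pos_of_ne_nil hsub
  have h3 : (PySem.Chars.findFrom s sub k none).toNat ≤ s.length :=
    le_of_lt (Nat.lt_of_sub_pos (lt_of_lt_of_le h2 h1))
  rw [Nat.add_comm]
  exact Nat.add_le_of_le_sub h3 h1


-- the three termination bounds, proved once here so the ports' well-founded
-- recursion carries only a lemma application
lemma pv_decA_repl (text : List Char) (from_ : Nat)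
    (hst : ¬ PySem.Chars.findFrom text pvGuard (from_ : Int) < 0)
    (he1 : ¬ PySem.Chars.findFrom text pvEndif (PySem.Chars.findFrom text pvGuard (from_ : Int)) < 0) :
    (PySem.List.slice text none (some (PySem.Chars.findFrom text pvGuard (from_ : Int))) ++ pvAliasBlock ++
        PySem.List.slice text
          (some ((if _h : PySem.Chars.findFrom text pvNl
                    (PySem.Chars.findFrom text pvEndif (PySem.Chars.findFrom text pvGuard (from_ : Int))) < 0 then
                  text.length
                else
                  (PySem.Chars.findFrom text pvNl
                    (PySem.Chars.findFrom text pvEndif (PySem.Chars.findFrom text pvGuard (from_ : Int)))).toNat + 1 : Nat) : Int))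
          none).length + 1 -
      ((PySem.Chars.findFrom text pvGuard (from_ : Int)).toNat + pvAliasBlock.length) <
    text.length + 1 - from_ := by
  have a1 := (pv_findFrom_spec text pvGuard (from_ : Int) (Int.natCast_nonneg _) hst).1
  have b1 := (pv_findFrom_spec text pvEndif _ (Int.not_lt.mp hst) he1).1
  have b2 := pv_findFrom_add_len text pvEndif _ (Int.not_lt.mp hst) he1 (by decide)
  have hfr_st : from_ ≤ (PySem.Chars.findFrom text pvGuard (from_ : Int)).toNat :=
    (Int.le_toNat (Int.not_lt.mp hst)).mpr a1
  have hst_e1 := Int.toNat_le_toNat b1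
  have he1_lt_len : (PySem.Chars.findFrom text pvEndif
      (PySem.Chars.findFrom text pvGuard (from_ : Int))).toNat < text.length :=
    Nat.lt_of_lt_of_le (Nat.lt_add_of_pos_right (by decide)) b2
  have hst_len : (PySem.Chars.findFrom text pvGuard (from_ : Int)).toNat ≤ text.length :=
    le_trans hst_e1 (le_of_lt he1_lt_len)
  have hfr_lt_len : from_ < text.length := Nat.lt_of_le_of_lt (le_trans hfr_st hst_e1) he1_lt_len
  rw [PySem.List.slice_to text (Int.not_lt.mp hst),
      PySem.List.slice_from text (Int.natCast_nonneg _)]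
  simp only [List.length_append, List.length_take, List.length_drop, Int.toNat_natCast]
  rw [Nat.min_eq_left hst_len, Nat.add_assoc, Nat.add_sub_cancel_left,
      Nat.sub_add_comm (le_of_lt hfr_lt_len)]
  refine Nat.add_lt_add_right (Nat.sub_lt_sub_left hfr_lt_len ?_) 1
  split
  · exact hfr_lt_len
  · next He2 =>
    have c1 := (pv_findFrom_spec text pvNl _ (Int.not_lt.mp he1) He2).1
    exact Nat.lt_succ_of_le (le_trans (le_trans hfr_st hst_e1) (Int.toNat_le_toNat c1))

lemma pv_decA_keep (text : List Char) (from_ : Nat)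
    (hst : ¬ PySem.Chars.findFrom text pvGuard (from_ : Int) < 0)
    (he1 : ¬ PySem.Chars.findFrom text pvEndif (PySem.Chars.findFrom text pvGuard (from_ : Int)) < 0) :
    (text.length + 1 -
      if _h : PySem.Chars.findFrom text pvNl
                (PySem.Chars.findFrom text pvEndif (PySem.Chars.findFrom text pvGuard (from_ : Int))) < 0 then
        text.length
      else
        (PySem.Chars.findFrom text pvNl
          (PySem.Chars.findFrom text pvEndif (PySem.Chars.findFrom text pvGuard (from_ : Int)))).toNat + 1) <
    text.length + 1 - from_ := by
  have a1 := (pv_findFrom_spec text pvGuard (from_ : Int) (Int.natCast_nonneg _) hst).1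
  have b1 := (pv_findFrom_spec text pvEndif _ (Int.not_lt.mp hst) he1).1
  have b2 := pv_findFrom_add_len text pvEndif _ (Int.not_lt.mp hst) he1 (by decide)
  have hfr_st : from_ ≤ (PySem.Chars.findFrom text pvGuard (from_ : Int)).toNat :=
    (Int.le_toNat (Int.not_lt.mp hst)).mpr a1
  have hst_e1 := Int.toNat_le_toNat b1
  have he1_lt_len : (PySem.Chars.findFrom text pvEndif
      (PySem.Chars.findFrom text pvGuard (from_ : Int))).toNat < text.length :=
    Nat.lt_of_lt_of_le (Nat.lt_add_of_pos_right (by decide)) b2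
  have hfr_lt_len : from_ < text.length := Nat.lt_of_le_of_lt (le_trans hfr_st hst_e1) he1_lt_len
  refine Nat.sub_lt_sub_left (Nat.lt_succ_of_lt hfr_lt_len) ?_
  split
  · exact hfr_lt_len
  · next He2 =>
    have c1 := (pv_findFrom_spec text pvNl _ (Int.not_lt.mp he1) He2).1
    exact Nat.lt_succ_of_le (le_trans (le_trans hfr_st hst_e1) (Int.toNat_le_toNat c1))

lemma pv_decB (rest : List Char)
    (hi : ¬ PySem.Chars.find rest pvGuard < 0) :
    (PySem.List.slice rest
      (some ((if _h : PySem.Chars.findFrom rest pvNl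
                (PySem.Chars.findFrom rest pvEndif (PySem.Chars.find rest pvGuard + (pvGuard.length : Int)) +
                  (pvEndif.length : Int)) < 0 then
              rest.length
            else
              (PySem.Chars.findFrom rest pvNl
                (PySem.Chars.findFrom rest pvEndif (PySem.Chars.find rest pvGuard + (pvGuard.length : Int)) +
                  (pvEndif.length : Int))).toNat + 1 : Nat) : Int))
      none).length < rest.length := by
  have hin : pvGuard <+: rest.drop (PySem.Chars.find rest pvGuard).toNat :=
    (PySem.Chars.find_spec (Int.not_lt.mp hi)).1
  have hlen := hin.length_le
  rw [List.length_drop] at hlen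
  have hpos : 0 < rest.length :=
    Nat.lt_of_lt_of_le (by decide : 0 < pvGuard.length) (le_trans hlen (Nat.sub_le _ _))
  rw [PySem.List.slice_from rest (Int.natCast_nonneg _)]
  simp only [List.length_drop, Int.toNat_natCast]
  split
  · exact Nat.sub_lt hpos hpos
  · exact Nat.sub_lt hpos (Nat.succ_pos _)

-- ===== PORT A =====
-- A's while loop: each iteration starts at the next guard occurrence (the Python
-- assigns 'start = text.find(guard, …)' at the end of an iteration and tests it at
-- the loop head; here that find is done at the head of the recursive call).
def pvA_loop (text : List Char) (from_ : Nat) : List Char :=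
  let st := PySem.Chars.findFrom text pvGuard (from_ : Int)
  if hst : st < 0 then text
  else
    let e1 := PySem.Chars.findFrom text pvEndif st
    if he1 : e1 < 0 then text
    else
      let e2 := PySem.Chars.findFrom text pvNl e1
      let endPos : Nat := if e2 < 0 then text.length else e2.toNat + 1
      let block := PySem.List.slice text (some st) (some (endPos : Int))
      if PySem.Chars.isIn pvFt64 block && PySem.Chars.isIn pvF block then
        pvA_loop
          (PySem.List.slice text none (some st) ++ pvAliasBlock ++
            PySem.List.slice text (some (endPos : Int)) none)
          (st.toNat + pvAliasBlock.length)
      else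
        pvA_loop text endPos
  termination_by text.length + 1 - from_
  decreasing_by
  · exact pv_decA_repl text from_ hst he1
  · exact pv_decA_keep text from_ hst he1

def normalize_guarded_alias_block (text : String) : String :=
  String.mk (pvA_loop text.toList 0)

-- ===== PORT B =====
-- B's while loop: walk the text front-to-back, appending the untouched prefix and the
-- (possibly replaced) guarded block to 'out', recursing on the remainder after the block.
def pvB_loop (rest : List Char) (out : List (List Char)) : List (List Char) :=
  let i := PySem.Chars.find rest pvGuard
  if hi : i < 0 then out ++ [rest]
  else
    let e := PySem.Chars.findFrom rest pvEndif (i + (pvGuard.length : Int))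
    if he : e < 0 then out ++ [rest]
    else
      let nl := PySem.Chars.findFrom rest pvNl (e + (pvEndif.length : Int))
      let cut : Nat := if nl < 0 then rest.length else nl.toNat + 1
      let block := PySem.List.slice rest (some i) (some (cut : Int))
      pvB_loop (PySem.List.slice rest (some (cut : Int)) none)
        (out ++ [PySem.List.slice rest none (some i),
                 if PySem.Chars.isIn pvFt64 block then pvAliasBlock else block])
  termination_by rest.length
  decreasing_by
    exact pv_decB rest hi

def normalize_guarded_alias_block_alt (text : String) : String :=
  String.mk (PySem.Chars.join [] (pvB_loop text.toList []))

-- ===== PRECONDITION & SPEC =====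
def Spec_normalize_guarded_alias_block (text : String) (out : String) : Prop := out = normalize_guarded_alias_block_alt text
instance (text : String) (out : String) : Decidable (Spec_normalize_guarded_alias_block text out) := by unfold Spec_normalize_guarded_alias_block; infer_instance

-- ===== CLAIM (what is proved, stated in full; the proofs are below) =====
def Claim_equal_normalize_guarded_alias_block : Prop := ∀ (text : String), Dom_normalize_guarded_alias_block text → Spec_normalize_guarded_alias_block text (normalize_guarded_alias_block text)

-- ===== LEMMAS AND PROOFS =====

-- general facts about first-occurrence search, used by the equivalence proof
lemma pv_drop_append_le {α : Type} (a v : List α) (k : Nat) (hk : k ≤ a.length) :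
    (a ++ v).drop k = a.drop k ++ v := by
  rw [List.drop_append, Nat.sub_eq_zero_of_le hk, List.drop_zero]

lemma pv_drop_append_ge {α : Type} (a v : List α) (k : Nat) (hk : a.length ≤ k) :
    (a ++ v).drop k = v.drop (k - a.length) := by
  rw [List.drop_append, List.drop_eq_nil_of_le hk, List.nil_append]

lemma pv_take_append_le {α : Type} (a v : List α) (k : Nat) :
    (a ++ v).take (a.length + k) = a ++ v.take k := by
  rw [List.take_append, List.take_of_length_le (by omega), Nat.add_sub_cancel_left]

lemma pv_prefix_take (pat x v : List Char) (h : pat <+: x ++ v) :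
    pat.take x.length <+: x := by
  obtain ⟨t, ht⟩ := h
  have h2 := congrArg (List.take x.length) ht
  rw [List.take_append] at h2
  simp at h2
  exact ⟨_, h2⟩

lemma pv_infix_drop (pat s : List Char) (m : Nat) (h : pat <+: s.drop m) : pat <:+: s :=
  (h.isInfix).trans (s.drop_suffix m).isInfix

-- uniqueness: find points at the first occurrence
lemma pv_find_eq (pat s : List Char) (m : Nat) (h1 : pat <+: s.drop m)
    (h2 : ∀ i < m, ¬ pat <+: s.drop i) : PySem.Chars.find s pat = (m : Int) := by
  have hnn : 0 ≤ PySem.Chars.find s pat := by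
    rw [PySem.Chars.find_nonneg_iff]
    exact pv_infix_drop pat s m h1
  obtain ⟨hp, hmin⟩ := PySem.Chars.find_spec hnn
  have : (PySem.Chars.find s pat).toNat = m := by
    rcases lt_trichotomy (PySem.Chars.find s pat).toNat m with h | h | h
    · exact absurd hp (h2 _ h)
    · exact h
    · exact absurd h1 (hmin _ h)
  omega

-- a first occurrence past a head 'a' that cannot overlap the head: find jumps over 'a'
lemma pv_find_shift (a v pat : List Char)
    (H : ∀ k, k < a.length → ¬ pat.take (a.length - k) <+: a.drop k) :
    PySem.Chars.find (a ++ v) pat =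
      if PySem.Chars.find v pat = -1 then -1 else (a.length : Int) + PySem.Chars.find v pat := by
  have F : ∀ k, k < a.length → ¬ pat <+: (a ++ v).drop k := by
    intro k hk hp
    rw [pv_drop_append_le a v k (le_of_lt hk)] at hp
    have h2 := pv_prefix_take pat (a.drop k) v hp
    rw [List.length_drop] at h2
    exact H k hk h2
  by_cases hv : PySem.Chars.find v pat = -1
  · rw [if_pos hv]
    rw [PySem.Chars.find_eq_neg_one_iff] at hv ⊢
    intro hinf
    obtain ⟨j, hj⟩ := (PySem.Chars.exists_prefix_drop_iff_isIn pat (a ++ v)).mpr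
      ((PySem.Chars.isIn_iff_infix pat (a ++ v)).mpr hinf)
    rcases lt_or_ge j a.length with hja | hja
    · exact F j hja hj
    · rw [pv_drop_append_ge a v j hja] at hj
      exact hv (pv_infix_drop _ _ _ hj)
  · rw [if_neg hv]
    have hj0 : 0 ≤ PySem.Chars.find v pat := by
      have := PySem.Chars.neg_one_le_find v pat
      omega
    obtain ⟨hp, hmin⟩ := PySem.Chars.find_spec hj0
    have heq : PySem.Chars.find (a ++ v) pat = ((a.length + (PySem.Chars.find v pat).toNat : Nat) : Int) := by
      apply pv_find_eq
      · rw [pv_drop_append_ge a v _ (by omega), Nat.add_sub_cancel_left]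
        exact hp
      · intro i hi hp2
        rcases lt_or_ge i a.length with h' | h'
        · exact F i h' hp2
        · rw [pv_drop_append_ge a v i h'] at hp2
          exact hmin (i - a.length) (by omega) hp2
    rw [heq]
    push_cast
    omega

-- the concrete non-overlap facts for the three patterns involved
lemma pv_H_guard_endif : ∀ k, k < pvGuard.length → ¬ pvEndif.take (pvGuard.length - k) <+: pvGuard.drop k := by decide
lemma pv_H_endif_nl : ∀ k, k < pvEndif.length → ¬ pvNl.take (pvEndif.length - k) <+: pvEndif.drop k := by decide

-- "vlc_entry__3_0_0f" is a prefix of "vlc_entry__3_0_0ft64", so A's second test is implied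
lemma pv_isIn_f (block : List Char) (h : PySem.Chars.isIn pvFt64 block = true) :
    PySem.Chars.isIn pvF block = true := by
  rw [PySem.Chars.isIn_iff_infix] at h ⊢
  exact ((show pvF <+: pvFt64 by decide).isInfix).trans h

theorem pv_join_nil (l : List (List Char)) : PySem.Chars.join [] l = l.flatten := by
  have aux : ∀ l : List (List Char), (List.intersperse ([] : List Char) l).flatten = l.flatten := by
    intro l
    induction l with
    | nil => rfl
    | cons a t ih =>
      cases t with
      | nil => simp
      | cons b u => simp_all [List.intersperse]
  simp [PySem.Chars.join, List.intercalate, aux]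

theorem pv_main (n : Nat) : ∀ s : List Char, s.length = n → ∀ (p : List Char) (out : List (List Char)),
    out.flatten = p → pvA_loop (p ++ s) p.length = (pvB_loop s out).flatten := by
  induction n using Nat.strong_induction_on with
  | _ n ih =>
  intro s hs p out hout
  rw [pvA_loop.eq_def, pvB_loop.eq_def]
  simp only []
  rw [PySem.Chars.findFrom_natCast (p ++ s) pvGuard p.length (by simp), List.drop_left]
  by_cases hi : PySem.Chars.find s pvGuard = -1
  · rw [if_pos hi, dif_pos (by norm_num), dif_pos (by omega)]
    simp [hout]
  · rw [if_neg hi]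
    have hi0 : 0 ≤ PySem.Chars.find s pvGuard := by
      have := PySem.Chars.neg_one_le_find s pvGuard
      omega
    obtain ⟨iN, hiN⟩ : ∃ m : Nat, PySem.Chars.find s pvGuard = (m : Int) := ⟨_, (Int.toNat_of_nonneg hi0).symm⟩
    have hile : (iN : Int) ≤ (s.length : Int) := hiN ▸ PySem.Chars.find_le_length s pvGuard
    obtain ⟨hpre, _⟩ := PySem.Chars.find_spec hi0
    rw [hiN, Int.toNat_natCast] at hpre
    obtain ⟨v, hv⟩ := hpre
    have hglen : pvGuard.length = 38 := by decide
    have hvlen : s.length = iN + 38 + v.length := by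
      have := congrArg List.length hv
      simp [hglen] at this
      omega
    have hdv : s.drop (iN + 38) = v := by
      have h := congrArg (List.drop 38) hv
      rw [List.drop_drop, List.drop_left' hglen] at h
      exact h.symm
    -- the common tail: once the block boundaries agree, both sides recurse on the remainder
    have htail : ∀ cutN : Nat, iN + 38 ≤ cutN → cutN ≤ s.length →
        (if (PySem.Chars.isIn pvFt64 (PySem.List.slice (p ++ s) (some ((p.length + iN : Nat) : Int)) (some ↑(p.length + cutN))) &&
            PySem.Chars.isIn pvF (PySem.List.slice (p ++ s) (some ((p.length + iN : Nat) : Int)) (some ↑(p.length + cutN)))) = true then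
            pvA_loop (PySem.List.slice (p ++ s) none (some ((p.length + iN : Nat) : Int)) ++ pvAliasBlock ++
                PySem.List.slice (p ++ s) (some ↑(p.length + cutN)) none)
              (((p.length + iN : Nat) : Int).toNat + pvAliasBlock.length)
          else pvA_loop (p ++ s) (p.length + cutN))
        = (pvB_loop (PySem.List.slice s (some ↑cutN) none)
            (out ++ [PySem.List.slice s none (some ↑iN),
                     if PySem.Chars.isIn pvFt64 (PySem.List.slice s (some ↑iN) (some ↑cutN)) = true then pvAliasBlock
                     else PySem.List.slice s (some ↑iN) (some ↑cutN)])).flatten := by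
      intro cutN hcA hcB
      rw [PySem.List.slice_natCast (p ++ s) (p.length + iN) (p.length + cutN),
          PySem.List.slice_natCast s iN cutN,
          show p.length + cutN - (p.length + iN) = cutN - iN from by omega,
          pv_drop_append_ge p s (p.length + iN) (by omega),
          show p.length + iN - p.length = iN from by omega,
          PySem.List.slice_from s (by positivity),
          PySem.List.slice_to s (by positivity)]
      simp only [Int.toNat_natCast]
      by_cases hc : PySem.Chars.isIn pvFt64 ((s.drop iN).take (cutN - iN)) = true
      · rw [if_pos (by rw [hc, pv_isIn_f _ hc]; rfl), if_pos hc,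
            PySem.List.slice_to (p ++ s) (by positivity),
            PySem.List.slice_from (p ++ s) (by positivity)]
        simp only [Int.toNat_natCast]
        rw [pv_take_append_le p s iN,
            pv_drop_append_ge p s (p.length + cutN) (by omega),
            show p.length + cutN - p.length = cutN from by omega]
        have hP : (p ++ s.take iN ++ pvAliasBlock).length = p.length + iN + pvAliasBlock.length := by
          simp [List.length_append, List.length_take]
          omega
        rw [← hP]
        exact ih (s.drop cutN).length (by simp; omega) (s.drop cutN) rfl
          (p ++ s.take iN ++ pvAliasBlock) (out ++ [s.take iN, pvAliasBlock]) (by simp [hout])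
      · rw [Bool.not_eq_true] at hc
        rw [hc, Bool.false_and, if_neg (by simp), if_neg (by simp)]
        have hblk : s.take iN ++ (s.drop iN).take (cutN - iN) = s.take cutN := by
          rw [← List.take_add]
          congr 1
          omega
        have hsplit : p ++ s = (p ++ s.take cutN) ++ s.drop cutN := by
          rw [List.append_assoc, List.take_append_drop]
        have hP2 : (p ++ s.take cutN).length = p.length + cutN := by
          simp [List.length_append, List.length_take]
          omega
        rw [hsplit, ← hP2]
        exact ih (s.drop cutN).length (by simp; omega) (s.drop cutN) rfl
          (p ++ s.take cutN) (out ++ [s.take iN, (s.drop iN).take (cutN - iN)])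
          (by simp [hout, hblk])
    -- now reduce both programs one step down to the shape htail closes
    rw [hiN, dif_neg (show ¬ ((p.length : Int) + (iN : Int) < 0) from by omega),
        dif_neg (show ¬ ((iN : Int) < 0) from by omega)]
    rw [show ((p.length : Int) + (iN : Int)) = ((p.length + iN : Nat) : Int) from by push_cast; ring]
    rw [PySem.Chars.findFrom_natCast (p ++ s) pvEndif (p.length + iN) (by simp; omega)]
    rw [pv_drop_append_ge p s (p.length + iN) (by omega),
        show p.length + iN - p.length = iN from by omega, ← hv]
    rw [pv_find_shift pvGuard v pvEndif pv_H_guard_endif]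
    rw [show ((iN : Int) + (pvGuard.length : Int)) = ((iN + 38 : Nat) : Int) from by push_cast [hglen]; ring]
    rw [PySem.Chars.findFrom_natCast s pvEndif (iN + 38) (by omega), hdv]
    by_cases hj : PySem.Chars.find v pvEndif = -1
    · rw [if_pos hj, if_pos hj, if_pos rfl, dif_pos (by norm_num), dif_pos (by norm_num)]
      simp [hout]
    · have hj0 : 0 ≤ PySem.Chars.find v pvEndif := by
        have := PySem.Chars.neg_one_le_find v pvEndif
        omega
      obtain ⟨jN, hjN⟩ : ∃ m : Nat, PySem.Chars.find v pvEndif = (m : Int) := ⟨_, (Int.toNat_of_nonneg hj0).symm⟩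
      have hjle : (jN : Int) ≤ (v.length : Int) := hjN ▸ PySem.Chars.find_le_length v pvEndif
      obtain ⟨hpre2, _⟩ := PySem.Chars.find_spec hj0
      rw [hjN, Int.toNat_natCast] at hpre2
      obtain ⟨w, hw⟩ := hpre2
      have helen : pvEndif.length = 6 := by decide
      have hwlen : v.length = jN + 6 + w.length := by
        have := congrArg List.length hw
        simp [helen] at this
        omega
      have hdw : v.drop (jN + 6) = w := by
        have h := congrArg (List.drop 6) hw
        rw [List.drop_drop, List.drop_left' helen] at h
        exact h.symm
      rw [hjN, if_neg (show ¬ ((jN : Int)) = -1 from by omega),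
          if_neg (show ¬ ((jN : Int)) = -1 from by omega),
          if_neg (show ¬ ((pvGuard.length : Int) + (jN : Int)) = -1 from by omega),
          dif_neg (show ¬ ((p.length + iN : Nat) : Int) + ((pvGuard.length : Int) + (jN : Int)) < 0 from by omega),
          dif_neg (show ¬ ((iN + 38 : Nat) : Int) + (jN : Int) < 0 from by omega)]
      rw [show ((p.length + iN : Nat) : Int) + ((pvGuard.length : Int) + (jN : Int)) = ((p.length + iN + 38 + jN : Nat) : Int) from by push_cast [hglen]; ring]
      rw [PySem.Chars.findFrom_natCast (p ++ s) pvNl (p.length + iN + 38 + jN) (by simp; omega)]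
      rw [pv_drop_append_ge p s (p.length + iN + 38 + jN) (by omega),
          show p.length + iN + 38 + jN - p.length = iN + 38 + jN from by omega,
          show iN + 38 + jN = iN + 38 + jN from rfl]
      have hdsw : s.drop (iN + 38 + jN) = pvEndif ++ w := by
        rw [← List.drop_drop, hdv, hw]
      rw [hdsw, pv_find_shift pvEndif w pvNl pv_H_endif_nl]
      rw [show ((iN + 38 : Nat) : Int) + (jN : Int) + (pvEndif.length : Int) = ((iN + 38 + jN + 6 : Nat) : Int) from by push_cast [helen]; ring]
      rw [PySem.Chars.findFrom_natCast s pvNl (iN + 38 + jN + 6) (by omega)]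
      have hdw2 : s.drop (iN + 38 + jN + 6) = w := by
        rw [show iN + 38 + jN + 6 = (iN + 38) + (jN + 6) from by omega, ← List.drop_drop, hdv, hdw]
      rw [hdw2]
      by_cases hq : PySem.Chars.find w pvNl = -1
      · rw [if_pos hq, if_pos hq, if_pos rfl,
            if_pos (show (-1 : Int) < 0 from by norm_num),
            if_pos (show (-1 : Int) < 0 from by norm_num),
            List.length_append]
        exact htail s.length (by omega) le_rfl
      · have hq0 : 0 ≤ PySem.Chars.find w pvNl := by
          have := PySem.Chars.neg_one_le_find w pvNl
          omega
        obtain ⟨qN, hqN⟩ : ∃ m : Nat, PySem.Chars.find w pvNl = (m : Int) := ⟨_, (Int.toNat_of_nonneg hq0).symm⟩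
        obtain ⟨hpre3, _⟩ := PySem.Chars.find_spec hq0
        rw [hqN, Int.toNat_natCast] at hpre3
        have hqlen : qN + 1 ≤ w.length := by
          have h1 := hpre3.length_le
          rw [List.length_drop] at h1
          have h2 : 0 < pvNl.length := by decide
          have hqle : (qN : Int) ≤ (w.length : Int) := hqN ▸ PySem.Chars.find_le_length w pvNl
          omega
        rw [hqN, if_neg (show ¬ ((qN : Int)) = -1 from by omega),
            if_neg (show ¬ ((qN : Int)) = -1 from by omega),
            if_neg (show ¬ ((pvEndif.length : Int) + (qN : Int)) = -1 from by omega),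
            if_neg (show ¬ ((p.length + iN + 38 + jN : Nat) : Int) + ((pvEndif.length : Int) + (qN : Int)) < 0 from by omega),
            if_neg (show ¬ ((iN + 38 + jN + 6 : Nat) : Int) + (qN : Int) < 0 from by omega)]
        rw [show (((p.length + iN + 38 + jN : Nat) : Int) + ((pvEndif.length : Int) + (qN : Int))).toNat + 1
              = p.length + (iN + 38 + jN + 6 + qN + 1) from by omega,
            show (((iN + 38 + jN + 6 : Nat) : Int) + (qN : Int)).toNat + 1
              = iN + 38 + jN + 6 + qN + 1 from by omega]
        exact htail (iN + 38 + jN + 6 + qN + 1) (by omega) (by omega)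

-- ===== VERDICT (by name: the statement is the Claim_ definition above) =====
theorem normalize_guarded_alias_block_spec : Claim_equal_normalize_guarded_alias_block := by
  intro text _
  unfold Spec_normalize_guarded_alias_block normalize_guarded_alias_block normalize_guarded_alias_block_alt
  rw [pv_join_nil]
  have := pv_main text.toList.length text.toList rfl [] [] rfl
  exact congrArg String.mk (by simpa using this)
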